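-- pv_equiv track=rewrite | github.com/BastiTee/python-cookbook | recipes/scan2mail/scan2mail.py | partition_timestamps
-- ===== SOURCE A (Python) =====
-- def partition_timestamps(list_ts):
--     """Partition given list of timestamps.
--
--     This algorithm will take an unordered list of integers representing
--     epoch timestamps and tries to find harmonic partitions for it. Harmonic
--     means that timestamps in the same partition are close to each other
--     compared to the remaining timestamps. If the time difference is bigger
--     than MAX_DIFFERENCE_IN_S then the timestamps will be considered as separate
--     partitions.
--     """
--     MAX_DIFFERENCE_IN_S = 60
--     list_ts = [int(ts) for ts in list_ts]
--     list_ts.sort()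
--
--     # go through input list and calculate distance between elements
--     ts_diffs = [list_ts[i] - list_ts[i - 1]
--                 for i, ts in enumerate(list_ts) if i > 0]
--
--     # create result list and append first original item to first partition
--     res_list_ts = [[list_ts[0]]]
--     list_pt = 0
--
--     # calculate new partitions (this is trivial atm since it only considers
--     # the max difference as criterion)
--     for i, ts_diff in enumerate(ts_diffs):
--         if ts_diff > MAX_DIFFERENCE_IN_S:
--             list_pt += 1
--             res_list_ts.append([])
--         res_list_ts[list_pt].append(list_ts[i + 1])
--
--     return res_list_ts
-- ===== SOURCE B (Python) =====
-- def partition_timestamps(list_ts):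
--     """Partition sorted timestamps into groups whose adjacent gaps are <= 60s.
--
--     Staged passes: first compute the list of cut indices (where the gap
--     exceeds 60s), then rebuild each partition as one slice of the sorted
--     list between consecutive boundaries.
--     """
--     ts = sorted(int(t) for t in list_ts)
--     cuts = [i for i in range(1, len(ts)) if ts[i] - ts[i - 1] > 60]
--     bounds = [0] + cuts + [len(ts)]
--     return [ts[a:b] for a, b in zip(bounds, bounds[1:])]
-- ===== Notes on version B (the rewrite author's own statement) =====
-- stated objective: alternative
-- what changed: B replaces A's fused single pass (difference list driving a partition-counter loop that appends element by element) by staged passes: compute the cut indices, pair up consecutive boundaries, and emit each partition as one slice of the sorted list.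
import Mathlib
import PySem

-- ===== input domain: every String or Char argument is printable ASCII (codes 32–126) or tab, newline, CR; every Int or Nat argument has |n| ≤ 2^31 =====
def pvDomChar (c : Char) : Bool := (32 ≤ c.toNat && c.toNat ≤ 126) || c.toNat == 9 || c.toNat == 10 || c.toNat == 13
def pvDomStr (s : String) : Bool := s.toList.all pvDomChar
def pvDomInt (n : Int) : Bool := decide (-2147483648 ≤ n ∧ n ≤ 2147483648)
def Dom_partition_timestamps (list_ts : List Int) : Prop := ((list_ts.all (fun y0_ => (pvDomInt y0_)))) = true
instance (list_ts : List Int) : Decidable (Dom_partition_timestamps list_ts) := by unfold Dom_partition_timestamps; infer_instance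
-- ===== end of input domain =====

-- B replaces A's fused diff-list + partition-counter loop by staged passes:
-- cut indices first, then one slice per partition (objective: alternative decomposition).

-- ===== PORT A =====
-- the loop body of A's 'for i, ts_diff in enumerate(ts_diffs)':
-- state = (res_list_ts, list_pt); 'res_list_ts[list_pt].append(x)' is an index update
def pvBodyA (s : List Int) (st : List (List Int) × Int) (p : Int × Int) : List (List Int) × Int :=
  let st' := if p.2 > 60 then (st.1 ++ [([] : List Int)], st.2 + 1) else st
  (PySem.List.pySetD st'.1 st'.2
      (PySem.List.pyGetD st'.1 st'.2 [] ++ [PySem.List.pyGetD s (p.1 + 1) 0]), st'.2)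

def partition_timestamps (list_ts : List Int) : List (List Int) :=
  -- 'int(ts)' is the identity on Int inputs; 'list_ts.sort()' is PySem.List.sorted
  let s := PySem.List.sorted list_ts id false
  let ts_diffs := ((PySem.List.enumerate s 0).filter (fun p => decide (p.1 > 0))).map
      (fun p => PySem.List.pyGetD s p.1 0 - PySem.List.pyGetD s (p.1 - 1) 0)
  -- 'list_ts[0]' raises IndexError on []; those inputs are excluded by Pre_
  let res0 : List (List Int) := [[PySem.List.pyGetD s 0 0]]
  ((PySem.List.enumerate ts_diffs 0).foldl (pvBodyA s) (res0, 0)).1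

-- ===== PORT B =====
def partition_timestamps_alt (list_ts : List Int) : List (List Int) :=
  let ts := PySem.List.sorted list_ts id false
  -- cuts = [i for i in range(1, len(ts)) if ts[i] - ts[i-1] > 60]
  let cuts := (PySem.List.pyRange 1 (PySem.List.len ts) 1).filter
      (fun i => decide (PySem.List.pyGetD ts i 0 - PySem.List.pyGetD ts (i - 1) 0 > 60))
  -- bounds = [0] + cuts + [len(ts)]
  let bounds := [(0 : Int)] ++ cuts ++ [PySem.List.len ts]
  -- [ts[a:b] for a, b in zip(bounds, bounds[1:])]
  (bounds.zip (PySem.List.slice bounds (some 1) none)).map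
      (fun p => PySem.List.slice ts (some p.1) (some p.2))

-- ===== PRECONDITION & SPEC =====
-- A raises IndexError on the empty list ('list_ts[0]'); Pre_ excludes exactly that.
def Pre_partition_timestamps (list_ts : List Int) : Prop := list_ts ≠ []
instance (list_ts : List Int) : Decidable (Pre_partition_timestamps list_ts) := by
  unfold Pre_partition_timestamps; infer_instance

def pvWitness_partition_timestamps : List Int := [10, 300, 40, 301]

def Spec_partition_timestamps (list_ts : List Int) (out : List (List Int)) : Prop := out = partition_timestamps_alt list_ts
instance (list_ts : List Int) (out : List (List Int)) : Decidable (Spec_partition_timestamps list_ts out) := by unfold Spec_partition_timestamps; infer_instance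

-- ===== CLAIM (what is proved, stated in full; the proofs are below) =====
def Claim_equal_partition_timestamps : Prop := ∀ (list_ts : List Int), Dom_partition_timestamps list_ts → Pre_partition_timestamps list_ts → Spec_partition_timestamps list_ts (partition_timestamps list_ts)

-- ===== LEMMAS AND PROOFS =====

-- the common functional core: forward grouping (splits on gaps > 60)
def pvFgo (cur : List Int) (prev : Int) : List Int → List (List Int)
  | [] => [cur]
  | y :: ys => if y - prev > 60 then cur :: pvFgo [y] y ys else pvFgo (cur ++ [y]) y ys

theorem pv_getD_append_len (acc : List (List Int)) (c : List Int) (d : List Int) :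
    (acc ++ [c]).getD acc.length d = c := by
  simp [List.getD]

theorem pv_set_append_len (acc : List (List Int)) (c v : List Int) :
    (acc ++ [c]).set acc.length v = acc ++ [v] := by
  induction acc with
  | nil => simp
  | cons a acc ih => simp [ih]

-- A's loop (fold over the enumerated diff list) computes pvFgo
theorem pv_loopA (s : List Int) (u : List Int) (prev : Int) (k : Nat)
    (acc : List (List Int)) (cur : List Int)
    (hdrop : s.drop k = prev :: u) :
    (List.foldl (pvBodyA s) (acc ++ [cur], (acc.length : Int))
        (PySem.List.enumerate (List.zipWith (· - ·) u (prev :: u)) (k : Int))).1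
      = acc ++ pvFgo cur prev u := by
  induction u generalizing prev k acc cur with
  | nil => simp [pvFgo]
  | cons y u ih =>
    have hy : s[k + 1]? = some y := by
      have h2 : (List.drop k s)[1]? = s[k + 1]? := List.getElem?_drop
      rw [hdrop] at h2
      simpa using h2.symm
    have hget : PySem.List.pyGetD s ((k : Int) + 1) 0 = y := by
      have : ((k : Int) + 1) = ((k + 1 : Nat) : Int) := by push_cast; ring
      rw [this, PySem.List.pyGetD_natCast, List.getD, hy]; rfl
    have hdrop' : s.drop (k + 1) = y :: u := by
      have h2 := congrArg (List.drop 1) hdrop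
      simpa [List.drop_drop] using h2
    rw [List.zipWith_cons_cons, PySem.List.enumerate_cons, List.foldl_cons]
    by_cases hc : y - prev > 60
    · have hstep : pvBodyA s (acc ++ [cur], (acc.length : Int)) ((k : Int), y - prev)
          = ((acc ++ [cur]) ++ [[y]], ((acc ++ [cur]).length : Int)) := by
        simp only [pvBodyA, if_pos hc, hget]
        have h1 : ((acc.length : Int) + 1) = (((acc ++ [cur]).length : Nat) : Int) := by
          simp
        rw [h1, PySem.List.pyGetD_natCast, PySem.List.pySetD_natCast]
        rw [pv_getD_append_len (acc ++ [cur]) [] []]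
        simp only [List.nil_append]
        rw [pv_set_append_len (acc ++ [cur]) [] [y]]
      have hk : ((k : Int) + 1) = ((k + 1 : Nat) : Int) := by push_cast; ring
      rw [hstep, hk, ih y (k + 1) (acc ++ [cur]) [y] (by exact_mod_cast hdrop')]
      simp [pvFgo, hc]
    · have hstep : pvBodyA s (acc ++ [cur], (acc.length : Int)) ((k : Int), y - prev)
          = (acc ++ [cur ++ [y]], (acc.length : Int)) := by
        simp only [pvBodyA, if_neg hc, hget]
        rw [PySem.List.pyGetD_natCast, PySem.List.pySetD_natCast]
        rw [pv_getD_append_len acc cur [], pv_set_append_len acc cur (cur ++ [y])]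
      have hk : ((k : Int) + 1) = ((k + 1 : Nat) : Int) := by push_cast; ring
      rw [hstep, hk, ih y (k + 1) acc (cur ++ [y]) (by exact_mod_cast hdrop')]
      simp [pvFgo, hc]

-- A's 'if i > 0' filter just strips the first enumerate entry
theorem pv_filter_enum (a : Int) (t : List Int) :
    (PySem.List.enumerate (a :: t) 0).filter (fun p => decide (p.1 > 0))
      = PySem.List.enumerate t 1 := by
  rw [PySem.List.enumerate_cons]
  rw [List.filter_cons]
  simp only [decide_eq_true_eq]
  rw [if_neg (by omega)]
  apply List.filter_eq_self.mpr
  intro p hp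
  have : p.1 ∈ (PySem.List.enumerate t 1).map (·.1) := List.mem_map_of_mem hp
  rw [PySem.List.map_fst_enumerate] at this
  have h1 := (PySem.List.mem_pyRange_one.mp this).1
  simp only [decide_eq_true_eq]
  omega

-- A's difference comprehension is the adjacent-difference zipWith
theorem pv_diffs (a : Int) (t : List Int) :
    (PySem.List.enumerate t 1).map
        (fun p => PySem.List.pyGetD (a :: t) p.1 0 - PySem.List.pyGetD (a :: t) (p.1 - 1) 0)
      = List.zipWith (· - ·) t (a :: t) := by
  apply List.ext_getElem
  · simp [PySem.List.length_enumerate]; try omega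
  · intro j hj1 hj2
    have hjt : j < t.length := by simpa [PySem.List.length_enumerate] using hj1
    rw [List.getElem_map, PySem.List.getElem_enumerate, List.getElem_zipWith]
    have e1 : (1 : Int) + (j : Int) = ((j + 1 : Nat) : Int) := by push_cast; ring
    have e2 : (1 : Int) + (j : Int) - 1 = ((j : Nat) : Int) := by omega
    have g1 : PySem.List.pyGetD (a :: t) ((1 : Int) + (j : Int)) 0 = t[j]'hjt := by
      rw [e1, PySem.List.pyGetD_natCast]
      simp [List.getD, hjt]
    have g2 : PySem.List.pyGetD (a :: t) ((1 : Int) + (j : Int) - 1) 0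
        = (a :: t)[j]'(Nat.lt_succ_of_lt hjt) := by
      rw [e2, PySem.List.pyGetD_natCast]
      simp [List.getD, Nat.lt_succ_of_lt hjt]
    rw [g1, g2]
    rfl

-- B-side helpers: the cut-index list from a start bound, and slicing between
-- consecutive boundaries
def pvCuts (s : List Int) (m : Int) : List Int :=
  (PySem.List.pyRange m (s.length : Int) 1).filter
    (fun i => decide (PySem.List.pyGetD s i 0 - PySem.List.pyGetD s (i - 1) 0 > 60))

def pvZipSlices (s : List Int) : List Int → List (List Int)
  | a :: b :: t => PySem.List.slice s (some a) (some b) :: pvZipSlices s (b :: t)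
  | _ => []

theorem pv_zip_slices (s : List Int) (bs : List Int) :
    (bs.zip bs.tail).map (fun p => PySem.List.slice s (some p.1) (some p.2))
      = pvZipSlices s bs := by
  induction bs with
  | nil => rfl
  | cons a bs ih =>
    cases bs with
    | nil => rfl
    | cons b t =>
      simp only [List.tail_cons, List.zip_cons_cons, List.map_cons, pvZipSlices]
      rw [← ih]
      rfl

-- main B lemma: boundary pairs of (p :: cuts from j+1 :: length) slice out pvFgo
theorem pv_slices_fgo (u : List Int) (s : List Int) (p j : Nat) (prev : Int) (cur : List Int)
    (hdrop : s.drop j = prev :: u) (hp : p ≤ j)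
    (hcur : cur = PySem.List.slice s (some (p : Int)) (some ((j : Int) + 1))) :
    pvZipSlices s ((p : Int) :: (pvCuts s ((j : Int) + 1) ++ [(s.length : Int)]))
      = pvFgo cur prev u := by
  induction u generalizing p j prev cur with
  | nil =>
    have hlen : s.length = j + 1 := by
      have := congrArg List.length hdrop
      simp at this
      omega
    have hcuts : pvCuts s ((j : Int) + 1) = [] := by
      unfold pvCuts
      rw [PySem.List.pyRange_one_eq_nil (by omega)]
      rfl
    rw [hcuts]
    simp only [List.nil_append, pvZipSlices, pvFgo]
    rw [hcur, hlen]
    norm_num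
  | cons y u ih =>
    have hjlt : j < s.length := by
      have := congrArg List.length hdrop
      simp at this
      omega
    have hdrop' : s.drop (j + 1) = y :: u := by
      have h2 := congrArg (List.drop 1) hdrop
      simpa [List.drop_drop] using h2
    have hj1lt : j + 1 < s.length := by
      have := congrArg List.length hdrop'
      simp at this
      omega
    have hyget : s[j + 1]? = some y := by
      have h2 : (List.drop (j+1) s)[0]? = s[j + 1]? := by
        simp [List.getElem?_drop]
      rw [hdrop'] at h2
      simpa using h2.symm
    have hpget : s[j]? = some prev := by
      have h2 : (List.drop j s)[0]? = s[j]? := by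
        simp [List.getElem?_drop]
      rw [hdrop] at h2
      simpa using h2.symm
    -- evaluate the filter predicate at index j+1
    have hpred : (PySem.List.pyGetD s ((j : Int) + 1) 0
        - PySem.List.pyGetD s ((j : Int) + 1 - 1) 0) = y - prev := by
      have e1 : ((j : Int) + 1) = ((j + 1 : Nat) : Int) := by push_cast; ring
      have e2 : ((j : Int) + 1 - 1) = ((j : Nat) : Int) := by omega
      rw [e2, e1, PySem.List.pyGetD_natCast, PySem.List.pyGetD_natCast]
      simp [List.getD, hyget, hpget]
    have hcons : pvCuts s ((j : Int) + 1)
        = (if (y - prev > 60) then [(j : Int) + 1] else [])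
            ++ pvCuts s (((j + 1 : Nat) : Int) + 1) := by
      unfold pvCuts
      rw [PySem.List.pyRange_one_cons (by exact_mod_cast hj1lt)]
      rw [List.filter_cons]
      have e3 : ((j : Int) + 1 + 1) = (((j + 1 : Nat) : Int) + 1) := by push_cast; ring
      rw [e3]
      by_cases hc : y - prev > 60
      · rw [if_pos (by simp only [decide_eq_true_eq, hpred]; exact hc)]
        rw [if_pos hc]
        rfl
      · rw [if_neg (by simp only [decide_eq_true_eq, hpred]; exact hc)]
        rw [if_neg hc]
        rw [List.nil_append]
    by_cases hc : y - prev > 60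
    · rw [hcons, if_pos hc]
      have hsing : PySem.List.slice s (some ((j + 1 : Nat) : Int))
          (some (((j + 1 : Nat) : Int) + 1)) = [y] := by
        have e4 : (((j + 1 : Nat) : Int) + 1) = ((j + 2 : Nat) : Int) := by push_cast; ring
        rw [e4, PySem.List.slice_natCast, hdrop']
        simp
      have hrec := ih (j + 1) (j + 1) y [y] hdrop' (le_refl _) hsing.symm
      have e5 : ((j : Int) + 1) = ((j + 1 : Nat) : Int) := by push_cast; ring
      simp only [List.cons_append, List.nil_append, pvZipSlices]
      rw [e5, hrec, pvFgo, if_pos hc, hcur, e5]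
    · rw [hcons, if_neg hc]
      simp only [List.nil_append]
      have hcur' : cur ++ [y] = PySem.List.slice s (some (p : Int))
          (some (((j + 1 : Nat) : Int) + 1)) := by
        have e4 : (((j + 1 : Nat) : Int) + 1) = ((j + 2 : Nat) : Int) := by push_cast; ring
        have e5 : ((j : Int) + 1) = ((j + 1 : Nat) : Int) := by push_cast; ring
        rw [e4, PySem.List.slice_natCast, hcur, e5, PySem.List.slice_natCast]
        have hidx : (s.drop p)[j + 1 - p]? = some y := by
          rw [List.getElem?_drop]
          rw [(by omega : p + (j + 1 - p) = j + 1)]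
          exact hyget
        have e6 : j + 2 - p = (j + 1 - p) + 1 := by omega
        rw [e6, List.take_add_one, hidx]
        rfl
      have hrec := ih p (j + 1) y (cur ++ [y]) hdrop' (by omega) hcur'
      rw [hrec, pvFgo, if_neg hc]

theorem partition_timestamps_spec : Claim_equal_partition_timestamps := by
  unfold Claim_equal_partition_timestamps
  intro l _ hpre
  unfold Spec_partition_timestamps
  obtain ⟨a, t, hs⟩ : ∃ a t, PySem.List.sorted l id false = a :: t := by
    cases hseq : PySem.List.sorted l id false with
    | nil =>
      exfalso; apply hpre
      have hlen : (PySem.List.sorted l id false).length = l.length := PySem.List.length_sorted ..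
      rw [hseq] at hlen
      exact List.eq_nil_of_length_eq_zero hlen.symm
    | cons b u => exact ⟨b, u, rfl⟩
  -- A computes pvFgo [a] a t
  have hA : partition_timestamps l = pvFgo [a] a t := by
    simp only [partition_timestamps, hs]
    rw [pv_filter_enum, pv_diffs]
    have h0 : ((0 : Int)) = ((0 : Nat) : Int) := by norm_num
    have hinit : ([[PySem.List.pyGetD (a :: t) 0 0]], (0 : Int))
        = (([] : List (List Int)) ++ [[a]], ((([] : List (List Int)).length : Nat) : Int)) := by
      simp [PySem.List.pyGetD_zero_cons]
    rw [hinit, h0, pv_loopA (a :: t) t a 0 [] [a] (by simp)]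
    simp
  -- B computes the boundary slices, which pv_slices_fgo turns into pvFgo [a] a t
  have hB : partition_timestamps_alt l = pvFgo [a] a t := by
    simp only [partition_timestamps_alt, hs, PySem.List.len_eq]
    rw [PySem.List.slice_from_one, pv_zip_slices]
    have hcur : [a] = PySem.List.slice (a :: t) (some ((0 : Nat) : Int))
        (some (((0 : Nat) : Int) + 1)) := by
      rw [(by norm_num : (((0 : Nat) : Int) + 1) = ((1 : Nat) : Int)), PySem.List.slice_natCast]
      simp
    have hmain := pv_slices_fgo t (a :: t) 0 0 a [a] (by simp) (le_refl _) hcur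
    unfold pvCuts at hmain
    simp only [Nat.cast_zero, zero_add] at hmain
    simp only [List.cons_append, List.nil_append]
    exact hmain
  rw [hA, hB]
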